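-- pv_equiv track=rewrite | github.com/the-vampiire/sqlit | sqlit/app.py | _get_word_before_cursor
-- ===== SOURCE A (Python) =====
-- def _get_word_before_cursor(text: str, cursor_pos: int) -> tuple[str, str]:
--     """Get the current word being typed and the context keyword before it."""
--     if cursor_pos <= 0 or cursor_pos > len(text):
--         return "", ""
--
--     before_cursor = text[:cursor_pos]
--
--     word_start = cursor_pos
--     while word_start > 0 and before_cursor[word_start - 1] not in " \t\n,()[]":
--         word_start -= 1
--     current_word = before_cursor[word_start:cursor_pos]
--
--     if "." in current_word:
--         parts = current_word.rsplit(".", 1)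
--         table_name = parts[0].strip("[]")
--         return parts[1] if len(parts) > 1 else "", f"column:{table_name}"
--
--     context_text = before_cursor[:word_start].upper().strip()
--
--     table_keywords = ["FROM", "JOIN", "INTO", "UPDATE", "TABLE"]
--     for kw in table_keywords:
--         if context_text.endswith(kw):
--             return current_word, "table"
--
--     if context_text.endswith("EXEC") or context_text.endswith("EXECUTE"):
--         return current_word, "procedure"
--
--     if context_text.endswith("SELECT") or context_text.endswith(","):
--         return current_word, "column_or_table"
--
--     return current_word, ""
-- ===== SOURCE B (Python) =====
-- _DELIMS = " \t\n,()[]"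
--
-- def _get_word_before_cursor(text: str, cursor_pos: int) -> tuple[str, str]:
--     """Get the current word being typed and the context keyword before it."""
--     if cursor_pos <= 0 or cursor_pos > len(text):
--         return "", ""
--
--     before = text[:cursor_pos]
--
--     # single forward pass: keep only the token currently being built
--     word = ""
--     for ch in before:
--         word = "" if ch in _DELIMS else word + ch
--
--     table, dot, column = word.rpartition(".")
--     if dot:
--         return column, "column:" + table.strip("[]")
--
--     ctx = before[:len(before) - len(word)].upper().strip()
--
--     if ctx.endswith(("FROM", "JOIN", "INTO", "UPDATE", "TABLE")):
--         return word, "table"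
--     if ctx.endswith(("EXEC", "EXECUTE")):
--         return word, "procedure"
--     if ctx.endswith(("SELECT", ",")):
--         return word, "column_or_table"
--     return word, ""
-- ===== Notes on version B (the rewrite author's own statement) =====
-- stated objective: alternative
-- what changed: The backward character-by-character while loop that finds the word start is replaced by a single forward fold that maintains the token currently being built, the '.'-in-word test plus rsplit by rpartition, and the keyword endswith chains by tuple endswith tests.
import Mathlib
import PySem

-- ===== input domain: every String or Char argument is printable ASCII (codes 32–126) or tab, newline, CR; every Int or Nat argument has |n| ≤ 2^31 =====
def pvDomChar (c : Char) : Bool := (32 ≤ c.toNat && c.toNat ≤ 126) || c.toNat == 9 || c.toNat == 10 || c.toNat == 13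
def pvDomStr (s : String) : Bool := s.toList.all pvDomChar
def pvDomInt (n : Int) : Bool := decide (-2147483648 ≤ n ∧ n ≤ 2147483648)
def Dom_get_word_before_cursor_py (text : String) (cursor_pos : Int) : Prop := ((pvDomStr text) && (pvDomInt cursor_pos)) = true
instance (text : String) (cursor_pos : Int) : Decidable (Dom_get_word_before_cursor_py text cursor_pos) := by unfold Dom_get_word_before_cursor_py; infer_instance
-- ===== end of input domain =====

-- B replaces A's backward character-by-character while loop with a single forward fold that
-- maintains the token being built, and the "." handling with rpartition; objective: alternative.


-- ===== PORT A =====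
-- the delimiter literal " \t\n,()[]" both Pythons mention
def pvDelims : List Char := [' ', '\t', '\n', ',', '(', ')', '[', ']']

-- split at the LAST '.'; `none` exactly when '.' is absent.  This is the exact combined port of
-- A's «"." in w» test followed by «w.rsplit(".", 1)» (the two rsplit parts), and of B's
-- «w.rpartition(".")» (dot non-empty ↔ some): no PySem primitive covers rsplit/rpartition.
def pvSplitLastDot : List Char → Option (List Char × List Char)
  | [] => none
  | c :: rest =>
    match pvSplitLastDot rest with
    | some (l, r) => some (c :: l, r)
    | none => if c = '.' then some ([], rest) else none

-- A's `while word_start > 0 and before_cursor[word_start - 1] not in " \t\n,()[]": word_start -= 1`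
-- (the index ws - 1 is always in range when called with ws ≤ length, so getD is exact)
def pvWsLoop (bc : List Char) : Nat → Nat
  | 0 => 0
  | ws + 1 => if pvDelims.contains (bc.getD ws ' ') then ws + 1 else pvWsLoop bc ws

def pvTableKeywords : List (List Char) :=
  ["FROM".toList, "JOIN".toList, "INTO".toList, "UPDATE".toList, "TABLE".toList]

def get_word_before_cursor_py (text : String) (cursor_pos : Int) : String × String :=
  if cursor_pos ≤ 0 ∨ PySem.Str.len text < cursor_pos then ("", "")
  else
    let bc := PySem.List.slice text.toList none (some cursor_pos)
    let ws := pvWsLoop bc cursor_pos.toNat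
    let cw := PySem.List.slice bc (some (ws : Int)) (some cursor_pos)
    match pvSplitLastDot cw with
    | some (t, c) =>
        -- parts[1] if len(parts) > 1 else "" : rsplit with '.' present always yields 2 parts
        (String.ofList c, String.ofList ("column:".toList ++ PySem.Chars.stripChars t ['[', ']']))
    | none =>
        let ctx := PySem.Chars.strip (PySem.Chars.upper (PySem.List.slice bc none (some (ws : Int))))
        -- `for kw in table_keywords: if context_text.endswith(kw): return …` = any with early exit
        if pvTableKeywords.any (fun kw => PySem.Chars.endswith ctx kw) then
          (String.ofList cw, "table")
        else if PySem.Chars.endswith ctx "EXEC".toList || PySem.Chars.endswith ctx "EXECUTE".toList then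
          (String.ofList cw, "procedure")
        else if PySem.Chars.endswith ctx "SELECT".toList || PySem.Chars.endswith ctx [','] then
          (String.ofList cw, "column_or_table")
        else (String.ofList cw, "")

-- ===== PORT B =====
def get_word_before_cursor_py_alt (text : String) (cursor_pos : Int) : String × String :=
  if cursor_pos ≤ 0 ∨ PySem.Str.len text < cursor_pos then ("", "")
  else
    let bc := PySem.List.slice text.toList none (some cursor_pos)
    -- word = "" if ch in _DELIMS else word + ch, over all of before
    let word := bc.foldl (fun w c => if pvDelims.contains c then [] else w ++ [c]) ([] : List Char)
    match pvSplitLastDot word with   -- word.rpartition("."): some ↔ dot non-empty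
    | some (table, column) =>
        (String.ofList column, String.ofList ("column:".toList ++ PySem.Chars.stripChars table ['[', ']']))
    | none =>
        let ctx := PySem.Chars.strip (PySem.Chars.upper (PySem.List.slice bc none
          (some ((bc.length : Int) - (word.length : Int)))))
        if ["FROM".toList, "JOIN".toList, "INTO".toList, "UPDATE".toList, "TABLE".toList].any
            (fun kw => PySem.Chars.endswith ctx kw) then
          (String.ofList word, "table")
        else if ["EXEC".toList, "EXECUTE".toList].any (fun kw => PySem.Chars.endswith ctx kw) then
          (String.ofList word, "procedure")
        else if ["SELECT".toList, [',']].any (fun kw => PySem.Chars.endswith ctx kw) then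
          (String.ofList word, "column_or_table")
        else (String.ofList word, "")

-- ===== PRECONDITION & SPEC =====
def Spec_get_word_before_cursor_py (text : String) (cursor_pos : Int) (out : String × String) : Prop := out = get_word_before_cursor_py_alt text cursor_pos
instance (text : String) (cursor_pos : Int) (out : String × String) : Decidable (Spec_get_word_before_cursor_py text cursor_pos out) := by unfold Spec_get_word_before_cursor_py; infer_instance

-- ===== CLAIM (what is proved, stated in full; the proofs are below) =====
def Claim_equal_get_word_before_cursor_py : Prop := ∀ (text : String) (cursor_pos : Int), Dom_get_word_before_cursor_py text cursor_pos → Spec_get_word_before_cursor_py text cursor_pos (get_word_before_cursor_py text cursor_pos)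

-- ===== LEMMAS AND PROOFS =====
lemma pvWsLoop_le (bc : List Char) (ws : Nat) : pvWsLoop bc ws ≤ ws := by
  induction ws with
  | zero => simp [pvWsLoop]
  | succ n ih => unfold pvWsLoop; split <;> omega

lemma pvWsLoop_append (bc : List Char) (c : Char) (ws : Nat) (h : ws ≤ bc.length) :
    pvWsLoop (bc ++ [c]) ws = pvWsLoop bc ws := by
  induction ws with
  | zero => rfl
  | succ n ih =>
    unfold pvWsLoop
    rw [List.getD, List.getD, List.getElem?_append_left (by omega)]
    split
    · rfl
    · exact ih (by omega)

lemma pvFold_eq_drop (bc : List Char) :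
    bc.foldl (fun w c => if pvDelims.contains c then [] else w ++ [c]) ([] : List Char)
      = bc.drop (pvWsLoop bc bc.length) := by
  induction bc using List.reverseRecOn with
  | nil => rfl
  | append_singleton bc c ih =>
    rw [List.foldl_append, List.foldl_cons, List.foldl_nil, ih]
    have hlen : (bc ++ [c]).length = bc.length + 1 := by simp
    rw [hlen]
    by_cases hc : pvDelims.contains c
    · have hget : (bc ++ [c]).getD bc.length ' ' = c := by simp [List.getD]
      have h0 : pvWsLoop (bc ++ [c]) (bc.length + 1) = bc.length + 1 := by
        rw [pvWsLoop, hget, if_pos hc]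
      rw [if_pos hc, h0, List.drop_eq_nil_of_le (by simp)]
    · have hget : (bc ++ [c]).getD bc.length ' ' = c := by simp [List.getD]
      have h1 : pvWsLoop (bc ++ [c]) (bc.length + 1) = pvWsLoop bc bc.length := by
        rw [pvWsLoop, hget, if_neg hc, pvWsLoop_append bc c bc.length (le_refl _)]
      rw [if_neg hc, h1,
        List.drop_append_of_le_length (pvWsLoop_le bc bc.length)]

-- ===== VERDICT (by name: the statement is the Claim_ definition above) =====
theorem get_word_before_cursor_py_spec : Claim_equal_get_word_before_cursor_py := by
  intro text cursor_pos _
  unfold Spec_get_word_before_cursor_py get_word_before_cursor_py get_word_before_cursor_py_alt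
  by_cases hg : cursor_pos ≤ 0 ∨ PySem.Str.len text < cursor_pos
  · rw [if_pos hg, if_pos hg]
  · rw [if_neg hg, if_neg hg]
    push Not at hg
    obtain ⟨hpos, hle⟩ := hg
    have hcp : cursor_pos = ((cursor_pos.toNat : Nat) : Int) := (Int.toNat_of_nonneg (le_of_lt hpos)).symm
    set n := cursor_pos.toNat with hn
    have hnle : n ≤ text.toList.length := by
      have := PySem.Str.len_eq text
      omega
    simp only [hcp, PySem.List.slice_to_natCast]
    set bc := text.toList.take n with hbc
    have hbclen : bc.length = n := by
      rw [hbc, List.length_take]; omega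
    set ws := pvWsLoop bc n with hwsdef
    have hwsle : ws ≤ n := pvWsLoop_le bc n
    have hword : List.foldl (fun w c => if pvDelims.contains c = true then [] else w ++ [c])
        ([] : List Char) bc = bc.drop ws := by
      rw [pvFold_eq_drop, hbclen]
    have hcw : PySem.List.slice bc (some (ws : Int)) (some ((n : Nat) : Int)) = bc.drop ws := by
      rw [PySem.List.slice_natCast]
      apply List.take_of_length_le
      simp [hbclen]
    have hlen2 : ((bc.length : Nat) : Int) - (((bc.drop ws).length : Nat) : Int) = ((ws : Nat) : Int) := by
      simp [hbclen]; omega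
    simp only [hword, hcw, hlen2]
    simp [pvTableKeywords]
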